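-- pv_equiv track=rewrite | github.com/wyk18703232953/myResearch | codeComplex/data copy/filteredData/python/linear/python_linear_0473.py | core_logic
-- ===== SOURCE A (Python) =====
-- def core_logic(n, cost, arr):
--     b = [0]
--     cost = b + cost[1:]
--     arr = b + arr[1:]
--     nv = [-1] * (n + 1)
--     colors = []
--     c = 0
--     for i in range(1, n + 1):
--         if nv[i] != -1:
--             continue
--         nv[i] = c
--         dest = arr[i]
--         while nv[dest] == -1:
--             nv[dest] = c
--             dest = arr[dest]
--         if nv[dest] == c:
--             colors.append(dest)
--         c += 1
--     s = 0
--     for i in colors: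
--         mi = cost[i]
--         nxt = arr[i]
--         while nxt != i:
--             mi = min(mi, cost[nxt])
--             nxt = arr[nxt]
--         s += mi
--     return s
-- ===== SOURCE B (Python) =====
-- def core_logic(n, cost, arr):
--     cost = [0] + cost[1:]
--     arr = [0] + arr[1:]
--     visited = [False] * (n + 1)
--     s = 0
--     for i in range(1, n + 1):
--         if visited[i]:
--             continue
--         path = []
--         x = i
--         while not visited[x]:
--             visited[x] = True
--             path.append(x)
--             x = arr[x]
--         if x in path:
--             s += min(cost[y] for y in path[path.index(x):])
--     return s
-- ===== Notes on version B (the rewrite author's own statement) =====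
-- stated objective: simpler
-- what changed: Single pass replacing A's two phases: a boolean visited array and an explicit path list per traversal; a cycle is detected by membership of the stopping node in the current path and its minimum cost is taken directly from the path suffix, so A's integer colour array, colours list and second re-walk of every cycle disappear.
-- outside the precondition, e.g. on core_logic(2, [0, 5, 7], [0, 1, -1]): A returns 12, B returns 5; on core_logic(2, [0, 5, 7], [0, 1, -2]): A returns 5, B returns 5
import Mathlib
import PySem

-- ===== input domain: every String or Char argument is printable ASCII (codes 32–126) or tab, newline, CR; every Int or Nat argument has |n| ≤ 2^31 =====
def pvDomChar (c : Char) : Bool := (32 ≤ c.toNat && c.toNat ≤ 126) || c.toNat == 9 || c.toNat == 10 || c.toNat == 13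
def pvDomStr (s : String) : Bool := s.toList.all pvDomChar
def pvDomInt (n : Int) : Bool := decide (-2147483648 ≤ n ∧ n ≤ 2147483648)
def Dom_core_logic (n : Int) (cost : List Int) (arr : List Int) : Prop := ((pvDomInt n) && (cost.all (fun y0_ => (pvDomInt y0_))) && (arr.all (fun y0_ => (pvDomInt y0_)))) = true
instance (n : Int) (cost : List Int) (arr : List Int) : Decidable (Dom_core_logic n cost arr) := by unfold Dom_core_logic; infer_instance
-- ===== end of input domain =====

-- B replaces A's two phases (integer colour array + colours list + per-cycle re-walk) by a single pass
-- with a boolean visited array and an explicit path list, reading each cycle's minimum off the path suffix.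

-- ===== PORT A =====
-- inner 'while nv[dest] == -1' loop of phase 1; the fuel only makes the recursion total
-- (each step overwrites one -1 entry, so fuel nv.length is never exhausted under Pre_)
def markLoop (arr2 : List Int) (c : Int) : Nat → List Int → Int → List Int × Int
  | 0, nv, dest => (nv, dest)
  | fuel+1, nv, dest =>
      if PySem.List.pyGetD nv dest 0 = -1 then
        markLoop arr2 c fuel (PySem.List.pySetD nv dest c) (PySem.List.pyGetD arr2 dest 0)
      else (nv, dest)

-- one iteration of A's phase-1 'for i in range(1, n+1)' body
def stepA (arr2 : List Int) (st : List Int × List Int × Int) (i : Int) : List Int × List Int × Int :=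
  match st with
  | (nv, colors, c) =>
      if PySem.List.pyGetD nv i 0 ≠ -1 then (nv, colors, c)
      else
        let nv1 := PySem.List.pySetD nv i c
        match markLoop arr2 c nv1.length nv1 (PySem.List.pyGetD arr2 i 0) with
        | (nv2, dest) =>
            if PySem.List.pyGetD nv2 dest 0 = c then (nv2, colors ++ [dest], c + 1)
            else (nv2, colors, c + 1)

-- inner 'while nxt != i' loop of A's phase 2 (fuel is a totality guard, as above)
def cycMin (arr2 cost2 : List Int) (i : Int) : Nat → Int → Int → Int
  | 0, mi, _ => mi
  | fuel+1, mi, nxt =>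
      if nxt ≠ i then
        cycMin arr2 cost2 i fuel (min mi (PySem.List.pyGetD cost2 nxt 0)) (PySem.List.pyGetD arr2 nxt 0)
      else mi

-- A's phase 2: 'for i in colors: … s += mi'
def phase2 (arr2 cost2 : List Int) (colors : List Int) : Int :=
  colors.foldl (fun s i =>
    s + cycMin arr2 cost2 i (arr2.length + 1) (PySem.List.pyGetD cost2 i 0) (PySem.List.pyGetD arr2 i 0)) 0

def core_logic (n : Int) (cost : List Int) (arr : List Int) : Int :=
  let cost2 := 0 :: cost.drop 1      -- cost = [0] + cost[1:]
  let arr2 := 0 :: arr.drop 1        -- arr = [0] + arr[1:]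
  match (PySem.List.pyRange 1 (n + 1) 1).foldl (stepA arr2) (List.replicate (n + 1).toNat (-1), [], 0) with
  | (_, colors, _) => phase2 arr2 cost2 colors

-- ===== PORT B =====
-- B's 'while not visited[x]' loop: mark, record the path, follow arr (fuel is a totality guard)
def visitLoop (arr2 : List Int) : Nat → List Bool → List Int → Int → List Bool × List Int × Int
  | 0, visited, path, x => (visited, path, x)
  | fuel+1, visited, path, x =>
      if PySem.List.pyGetD visited x false = false then
        visitLoop arr2 fuel (PySem.List.pySetD visited x true) (path ++ [x]) (PySem.List.pyGetD arr2 x 0)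
      else (visited, path, x)

-- one iteration of B's 'for i in range(1, n+1)' body
def stepB (arr2 cost2 : List Int) (st : List Bool × Int) (i : Int) : List Bool × Int :=
  match st with
  | (visited, s) =>
      if PySem.List.pyGetD visited i false = true then (visited, s)
      else
        match visitLoop arr2 (visited.length + 1) visited [] i with
        | (visited1, path, x) =>
            if path.contains x then
              let idx := (PySem.List.index? path x).getD 0
              (visited1, s + (PySem.List.min? ((path.drop idx).map (fun y => PySem.List.pyGetD cost2 y 0)) (fun v => v)).getD 0)
            else (visited1, s)

def core_logic_alt (n : Int) (cost : List Int) (arr : List Int) : Int :=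
  let cost2 := 0 :: cost.drop 1      -- cost = [0] + cost[1:]
  let arr2 := 0 :: arr.drop 1        -- arr = [0] + arr[1:]
  ((PySem.List.pyRange 1 (n + 1) 1).foldl (stepB arr2 cost2) (List.replicate (n + 1).toNat false, 0)).2

-- ===== PRECONDITION & SPEC =====
-- Pre_ restricts to the natural functional-graph domain: for n > 0 the lists must cover nodes 0..n and
-- every successor arr[1..n] must lie in [0, n]; outside it A raises IndexError on too-short lists, and on
-- out-of-range successors Python's negative-index wraparound (or a cycle below the list length) yields
-- accidental results where it does not raise.
def Pre_core_logic (n : Int) (cost : List Int) (arr : List Int) : Prop :=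
  n ≤ 0 ∨ (n.toNat + 1 ≤ cost.length ∧ n.toNat + 1 ≤ arr.length ∧
    ∀ x ∈ (arr.take (n.toNat + 1)).drop 1, 0 ≤ x ∧ x ≤ n)
instance (n : Int) (cost : List Int) (arr : List Int) : Decidable (Pre_core_logic n cost arr) := by
  unfold Pre_core_logic; infer_instance

def pvWitness_core_logic : Int × List Int × List Int := (2, [0, 5, 7], [0, 2, 1])

def Spec_core_logic (n : Int) (cost : List Int) (arr : List Int) (out : Int) : Prop := out = core_logic_alt n cost arr
instance (n : Int) (cost : List Int) (arr : List Int) (out : Int) : Decidable (Spec_core_logic n cost arr out) := by unfold Spec_core_logic; infer_instance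

-- ===== CLAIM (what is proved, stated in full; the proofs are below) =====
def Claim_equal_core_logic : Prop := ∀ (n : Int) (cost : List Int) (arr : List Int), Dom_core_logic n cost arr → Pre_core_logic n cost arr → Spec_core_logic n cost arr (core_logic n cost arr)

-- ===== LEMMAS AND PROOFS =====

-- invariant tying A's colour array nv to B's visited array and current path during one pass of colour c
structure PassInv (arr2 : List Int) (L : Nat) (c : Int)
    (nv : List Int) (visited : List Bool) (path : List Int) (dest : Int) : Prop where
  lenNv : nv.length = L
  lenVis : visited.length = L
  corr : ∀ j : Nat, j < L → (visited.getD j false = true ↔ nv.getD j 0 ≠ -1)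
  destLo : 0 ≤ dest
  destHi : dest < (L : Int)
  pathRange : ∀ y ∈ path, 0 ≤ y ∧ y < (L : Int)
  pathMarked : ∀ y ∈ path, nv.getD y.toNat 0 = c
  notPath : ∀ j : Nat, j < L → (↑j : Int) ∉ path → nv.getD j 0 < c
  nodup : path.Nodup
  chain : path.IsChain (fun a b => arr2.getD a.toNat 0 = b)
  lastTo : ∀ h : path ≠ [], arr2.getD ((path.getLast h).toNat) 0 = dest

theorem lockstep (arr2 : List Int) (L : Nat) (c : Int) (hc : 0 ≤ c)
    (hA : ∀ j : Nat, j < L → 0 ≤ arr2.getD j 0 ∧ arr2.getD j 0 < (L : Int)) :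
    ∀ (fuel : Nat) (nv : List Int) (visited : List Bool) (path : List Int) (dest : Int),
      PassInv arr2 L c nv visited path dest →
      (markLoop arr2 c fuel nv dest).2 = (visitLoop arr2 fuel visited path dest).2.2 ∧
      PassInv arr2 L c (markLoop arr2 c fuel nv dest).1 (visitLoop arr2 fuel visited path dest).1
        (visitLoop arr2 fuel visited path dest).2.1 (markLoop arr2 c fuel nv dest).2 := by
  intro fuel
  induction fuel with
  | zero => intro nv visited path dest hinv; exact ⟨rfl, hinv⟩
  | succ f ih =>
    intro nv visited path dest hinv
    obtain ⟨hlenNv, hlenVis, hcorr, hdl, hdh, hpr, hpm, hnp, hnd, hch, hlt⟩ := hinv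
    have hdn : dest = ((dest.toNat : Int)) := (Int.toNat_of_nonneg hdl).symm
    have hdL : dest.toNat < L := by omega
    have hgetNv : PySem.List.pyGetD nv dest 0 = nv.getD dest.toNat 0 := by
      rw [hdn, PySem.List.pyGetD_natCast, Int.toNat_natCast]
    have hgetVis : PySem.List.pyGetD visited dest false = visited.getD dest.toNat false := by
      rw [hdn, PySem.List.pyGetD_natCast, Int.toNat_natCast]
    by_cases hmark : nv.getD dest.toNat 0 = -1
    · -- both loops take a step
      have hvisF : visited.getD dest.toNat false = false := by
        have h := hcorr dest.toNat hdL
        cases hb : visited.getD dest.toNat false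
        · rfl
        · exact absurd hmark (h.mp hb)
      have hsetNv : PySem.List.pySetD nv dest c = nv.set dest.toNat c := by
        rw [hdn, PySem.List.pySetD_natCast, Int.toNat_natCast]
      have hsetVis : PySem.List.pySetD visited dest true = visited.set dest.toNat true := by
        rw [hdn, PySem.List.pySetD_natCast, Int.toNat_natCast]
      have hgetArr : PySem.List.pyGetD arr2 dest 0 = arr2.getD dest.toNat 0 := by
        rw [hdn, PySem.List.pyGetD_natCast, Int.toNat_natCast]
      have hdnotpath : dest ∉ path := by
        intro hmem
        have := hpm dest hmem
        rw [this] at hmark; omega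
      simp only [markLoop, visitLoop, hgetNv, hgetVis, hvisF, hmark, if_pos, hsetNv, hsetVis,
        hgetArr, if_true, reduceIte]
      apply ih
      refine ⟨by simp [hlenNv], by simp [hlenVis], ?_, (hA dest.toNat hdL).1, (hA dest.toNat hdL).2,
        ?_, ?_, ?_, ?_, ?_, ?_⟩
      · intro j hj
        have h1 : (visited.set dest.toNat true).getD j false = if dest.toNat = j then true else visited.getD j false := by
          rw [List.getD_eq_getElem _ _ (by first | omega | (rw [List.length_set]; omega)), List.getElem_set,
            List.getD_eq_getElem _ _ (by first | omega | (rw [List.length_set]; omega))]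
        have h2 : (nv.set dest.toNat c).getD j 0 = if dest.toNat = j then c else nv.getD j 0 := by
          rw [List.getD_eq_getElem _ _ (by first | omega | (rw [List.length_set]; omega)), List.getElem_set,
            List.getD_eq_getElem _ _ (by first | omega | (rw [List.length_set]; omega))]
        rw [h1, h2]
        by_cases hje : dest.toNat = j
        · simp [hje]; omega
        · rw [if_neg hje, if_neg hje]; exact hcorr j hj
      · intro y hy
        rcases List.mem_append.mp hy with hy | hy
        · exact hpr y hy
        · simp at hy; subst hy; exact ⟨hdl, hdh⟩
      · intro y hy
        have hyv : (nv.set dest.toNat c).getD y.toNat 0 = if dest.toNat = y.toNat then c else nv.getD y.toNat 0 := by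
          have hyL : y.toNat < L := by
            rcases List.mem_append.mp hy with hy | hy
            · have := hpr y hy; omega
            · simp at hy; subst hy; omega
          rw [List.getD_eq_getElem _ _ (by first | omega | (rw [List.length_set]; omega)), List.getElem_set,
            List.getD_eq_getElem _ _ (by first | omega | (rw [List.length_set]; omega))]
        rw [hyv]
        rcases List.mem_append.mp hy with hy | hy
        · by_cases hye : dest.toNat = y.toNat
          · simp [hye]
          · simp [hye]; exact hpm y hy
        · simp at hy; subst hy; simp
      · intro j hj hjn
        have hjd : j ≠ dest.toNat := by
          intro h; subst h
          exact hjn (by simp [← hdn])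
        have : (nv.set dest.toNat c).getD j 0 = nv.getD j 0 := by
          rw [List.getD_eq_getElem _ _ (by first | omega | (rw [List.length_set]; omega)), List.getElem_set,
            List.getD_eq_getElem _ _ (by first | omega | (rw [List.length_set]; omega))]
          rw [if_neg (fun h => hjd h.symm)]
        rw [this]
        exact hnp j hj (fun hmem => hjn (List.mem_append.mpr (Or.inl hmem)))
      · exact List.Nodup.append hnd (by simp) (by simp [hdnotpath])
      · refine hch.append (List.isChain_singleton _) ?_
        intro x hx y hy
        simp at hy; subst hy
        have hne : path ≠ [] := by rintro rfl; simp at hx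
        rw [List.getLast?_eq_some_getLast hne, Option.mem_some_iff] at hx
        rw [← hx]
        exact hlt hne
      · intro h
        rw [List.getLast_append h]
        simp
    · -- both loops stop
      have hvisT : visited.getD dest.toNat false = true := (hcorr dest.toNat hdL).mpr hmark
      simp only [markLoop, visitLoop, hgetNv, hgetVis, hvisT, hmark, reduceIte]
      exact ⟨rfl, ⟨hlenNv, hlenVis, hcorr, hdl, hdh, hpr, hpm, hnp, hnd, hch, hlt⟩⟩

theorem cycMin_spec (arr2 cost2 : List Int) (d : Int) :
    ∀ (l : List Int) (fuel : Nat) (mi : Int), l.length ≤ fuel →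
      (∀ y ∈ l, y ≠ d) → (∀ y ∈ l, 0 ≤ y) →
      l.IsChain (fun a b => arr2.getD a.toNat 0 = b) →
      (∀ h : l ≠ [], arr2.getD ((l.getLast h).toNat) 0 = d) →
      cycMin arr2 cost2 d fuel mi (l.headD d) =
        l.foldl (fun m y => min m (PySem.List.pyGetD cost2 y 0)) mi := by
  intro l
  induction l with
  | nil =>
    intro fuel mi _ _ _ _ _
    cases fuel <;> simp [cycMin]
  | cons y rest ih =>
    intro fuel mi hfuel hne hnn hchain hlast
    cases fuel with
    | zero => simp at hfuel
    | succ f =>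
      have hy : y ≠ d := hne y (by simp)
      have h0 : (0:Int) ≤ y := hnn y (by simp)
      have hget : PySem.List.pyGetD arr2 y 0 = arr2.getD y.toNat 0 := by
        rw [← Int.toNat_of_nonneg h0, PySem.List.pyGetD_natCast, Int.toNat_natCast]
      rcases rest with _ | ⟨z, t⟩
      · have hd : arr2.getD y.toNat 0 = d := by simpa using hlast (by simp)
        simp only [List.headD_cons, cycMin, if_pos hy, hget, hd]
        cases f <;> simp [cycMin, List.foldl]
      · have hz : arr2.getD y.toNat 0 = z := (List.isChain_cons_cons.mp hchain).1
        simp only [List.headD_cons, cycMin, if_pos hy, hget, hz]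
        have ih' := ih f (min mi (PySem.List.pyGetD cost2 y 0)) (by simpa using hfuel)
          (fun w hw => hne w (by simp [hw])) (fun w hw => hnn w (by simp [hw]))
          (hchain.suffix (List.suffix_cons y (z :: t)))
          (fun h => by simpa [List.getLast_cons h] using hlast (by simp))
        rw [List.headD_cons] at ih'
        rw [ih']
        simp [List.foldl]

theorem nodup_bounded_length (L : Nat) (l : List Int) (hnd : l.Nodup)
    (hb : ∀ y ∈ l, 0 ≤ y ∧ y < (L : Int)) : l.length ≤ L := by
  classical
  rw [← List.toFinset_card_of_nodup hnd]
  have hsub : l.toFinset ⊆ Finset.image (fun k : ℕ => (k : Int)) (Finset.range L) := by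
    intro x hx
    rw [List.mem_toFinset] at hx
    rcases hb x hx with ⟨h1, h2⟩
    exact Finset.mem_image.mpr ⟨x.toNat, Finset.mem_range.mpr (by omega), by omega⟩
  calc l.toFinset.card ≤ _ := Finset.card_le_card hsub
    _ ≤ (Finset.range L).card := Finset.card_image_le
    _ = L := Finset.card_range L

theorem outerInv (arr2 cost2 : List Int) (L : Nat) (hL : L ≤ arr2.length)
    (hA : ∀ j : Nat, j < L → 0 ≤ arr2.getD j 0 ∧ arr2.getD j 0 < (L : Int)) :
    ∀ (is : List Int) (nv : List Int) (visited : List Bool) (colors : List Int) (c s : Int),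
      (∀ i ∈ is, 0 ≤ i ∧ i < (L : Int)) →
      nv.length = L → visited.length = L →
      (∀ j : Nat, j < L → (visited.getD j false = true ↔ nv.getD j 0 ≠ -1)) →
      0 ≤ c → (∀ j : Nat, j < L → nv.getD j 0 < c) →
      s = phase2 arr2 cost2 colors →
      (is.foldl (stepB arr2 cost2) (visited, s)).2 =
        phase2 arr2 cost2 (is.foldl (stepA arr2) (nv, colors, c)).2.1 := by
  intro is
  induction is with
  | nil => intro nv visited colors c s _ _ _ _ _ _ hs; simpa using hs
  | cons i rest ih =>
    intro nv visited colors c s hmem hlnv hlvis hcorr hc hlt hs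
    obtain ⟨hi0, hiL⟩ := hmem i (by simp)
    have hin : i = ((i.toNat : Int)) := (Int.toNat_of_nonneg hi0).symm
    have hiLn : i.toNat < L := by omega
    have hgNv : PySem.List.pyGetD nv i 0 = nv.getD i.toNat 0 := by
      rw [hin, PySem.List.pyGetD_natCast, Int.toNat_natCast]
    have hgVis : PySem.List.pyGetD visited i false = visited.getD i.toNat false := by
      rw [hin, PySem.List.pyGetD_natCast, Int.toNat_natCast]
    simp only [List.foldl_cons]
    by_cases hm : nv.getD i.toNat 0 = -1
    · -- node i is unvisited: both implementations run one pass
      have hvF : visited.getD i.toNat false = false := by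
        have h := hcorr i.toNat hiLn
        cases hb : visited.getD i.toNat false
        · rfl
        · exact absurd hm (h.mp hb)
      have hsetN : PySem.List.pySetD nv i c = nv.set i.toNat c := by
        rw [hin, PySem.List.pySetD_natCast, Int.toNat_natCast]
      have hsetV : PySem.List.pySetD visited i true = visited.set i.toNat true := by
        rw [hin, PySem.List.pySetD_natCast, Int.toNat_natCast]
      have hgArr : PySem.List.pyGetD arr2 i 0 = arr2.getD i.toNat 0 := by
        rw [hin, PySem.List.pyGetD_natCast, Int.toNat_natCast]
      -- entry invariant for the pass
      have hentry : PassInv arr2 L c (nv.set i.toNat c) (visited.set i.toNat true) [i]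
          (PySem.List.pyGetD arr2 i 0) := by
        refine ⟨by simp [hlnv], by simp [hlvis], ?_, by rw [hgArr]; exact (hA i.toNat hiLn).1,
          by rw [hgArr]; exact (hA i.toNat hiLn).2, ?_, ?_, ?_, by simp, List.isChain_singleton _, ?_⟩
        · intro j hj
          have h1 : (visited.set i.toNat true).getD j false = if i.toNat = j then true else visited.getD j false := by
            rw [List.getD_eq_getElem _ _ (by rw [List.length_set]; omega), List.getElem_set,
              List.getD_eq_getElem _ _ (by omega)]
          have h2 : (nv.set i.toNat c).getD j 0 = if i.toNat = j then c else nv.getD j 0 := by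
            rw [List.getD_eq_getElem _ _ (by rw [List.length_set]; omega), List.getElem_set,
              List.getD_eq_getElem _ _ (by omega)]
          rw [h1, h2]
          by_cases hje : i.toNat = j
          · simp [hje]; omega
          · rw [if_neg hje, if_neg hje]; exact hcorr j hj
        · intro y hy; simp at hy; subst hy; exact ⟨hi0, hiL⟩
        · intro y hy; simp at hy; subst hy
          rw [List.getD_eq_getElem _ _ (by rw [List.length_set]; omega), List.getElem_set]
          simp
        · intro j hj hjn
          have hjd : ¬ i.toNat = j := by
            intro h; subst h; exact hjn (by simp [← hin])
          have : (nv.set i.toNat c).getD j 0 = nv.getD j 0 := by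
            rw [List.getD_eq_getElem _ _ (by rw [List.length_set]; omega), List.getElem_set,
              List.getD_eq_getElem _ _ (by omega), if_neg hjd]
          rw [this]
          exact hlt j hj
        · intro h
          show arr2.getD ([i].getLast h).toNat 0 = _
          rw [List.getLast_singleton]
          exact hgArr.symm
      obtain ⟨heq, hfin⟩ := lockstep arr2 L c hc hA L (nv.set i.toNat c) (visited.set i.toNat true)
        [i] (PySem.List.pyGetD arr2 i 0) hentry
      rcases hm2 : markLoop arr2 c L (nv.set i.toNat c) (PySem.List.pyGetD arr2 i 0) with ⟨nv2, d⟩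
      rcases hv2 : visitLoop arr2 L (visited.set i.toNat true) [i] (PySem.List.pyGetD arr2 i 0)
        with ⟨vis2, path2, x⟩
      rw [hm2, hv2] at heq hfin
      simp only at heq hfin
      subst heq
      -- unfold one step of B's while loop, then rewrite both step functions
      have hone : visitLoop arr2 (visited.length + 1) visited [] i = (vis2, path2, d) := by
        rw [hlvis]
        show visitLoop arr2 (L + 1) visited [] i = _
        rw [visitLoop, hgVis, hvF, if_pos rfl, hsetV, ← hv2]
        rfl
      have hAstep : stepA arr2 (nv, colors, c) i =
          (if PySem.List.pyGetD nv2 d 0 = c then (nv2, colors ++ [d], c + 1) else (nv2, colors, c + 1)) := by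
        simp only [stepA, hgNv, hm, ne_eq, not_true_eq_false, if_false, hsetN]
        rw [show (nv.set i.toNat c).length = L by simp [hlnv], hm2]
      have hBstep : stepB arr2 cost2 (visited, s) i =
          (if path2.contains d then
            (vis2, s + (PySem.List.min? ((path2.drop ((PySem.List.index? path2 d).getD 0)).map
              (fun y => PySem.List.pyGetD cost2 y 0)) (fun v => v)).getD 0)
          else (vis2, s)) := by
        simp only [stepB, hgVis, hvF, Bool.false_eq_true, if_false, hone]
      rw [hAstep, hBstep]
      obtain ⟨hlenNv2, hlenVis2, hcorr2, hd0, hdH, hpr2, hpm2, hnp2, hnd2, hch2, hlt2⟩ := hfin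
      have hdn : d = ((d.toNat : Int)) := (Int.toNat_of_nonneg hd0).symm
      have hdLn : d.toNat < L := by omega
      have hgNv2 : PySem.List.pyGetD nv2 d 0 = nv2.getD d.toNat 0 := by
        rw [hdn, PySem.List.pyGetD_natCast, Int.toNat_natCast]
      have hcond : (PySem.List.pyGetD nv2 d 0 = c) ↔ d ∈ path2 := by
        rw [hgNv2]
        constructor
        · intro hcv
          by_contra hnmem
          have : (↑d.toNat : Int) ∉ path2 := by rwa [← hdn]
          have := hnp2 d.toNat hdLn this
          omega
        · intro hmem
          have := hpm2 d hmem
          exact this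
      have hlt' : ∀ j : Nat, j < L → nv2.getD j 0 < c + 1 := by
        intro j hj
        by_cases hjp : ((j : Int)) ∈ path2
        · have := hpm2 _ hjp
          rw [Int.toNat_natCast] at this
          omega
        · have := hnp2 j hj hjp
          omega
      by_cases hcyc : d ∈ path2
      · -- a new cycle with entry d
        rw [if_pos (hcond.mpr hcyc), if_pos (by simpa using hcyc)]
        -- the value B adds equals A's phase-2 walk for colour d
        rcases hidx : PySem.List.index? path2 d with _ | k
        · exact absurd hcyc ((PySem.List.index?_eq_none_iff path2 d).mp hidx)
        · simp only [Option.getD_some]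
          obtain ⟨pre, suf, hdecomp, hprelen, hdpre⟩ := (PySem.List.index?_eq_some_iff path2 d k).mp hidx
          have hdropk : path2.drop k = d :: suf := by
            rw [hdecomp, ← hprelen, List.drop_left]
          have hsufx : (d :: suf) <:+ path2 := ⟨pre, hdecomp.symm⟩
          have hchsuf : (d :: suf).IsChain (fun a b => arr2.getD a.toNat 0 = b) := hch2.suffix hsufx
          have hndds : (d :: suf).Nodup := hnd2.sublist (hsufx.sublist)
          have hdnsuf : d ∉ suf := by
            intro hmem
            exact (List.nodup_cons.mp hndds).1 hmem
          have hpne : path2 ≠ [] := by rw [hdecomp]; simp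
          have hlast2 := hlt2 hpne
          have hlq : path2.getLast? = (d :: suf).getLast? := by
            rw [hdecomp]; exact List.getLast?_append_of_ne_nil pre (by simp)
          have hlastcons : ∀ h : (d :: suf) ≠ [], arr2.getD ((d :: suf).getLast h).toNat 0 = d := by
            intro h
            have h1 := List.getLast?_eq_some_getLast hpne
            have h2 := List.getLast?_eq_some_getLast (l := d :: suf) h
            have heql : path2.getLast hpne = (d :: suf).getLast h := by
              rw [hlq, h2] at h1
              exact (Option.some.inj h1).symm
            rw [← heql]; exact hlast2
          have hgArrD : PySem.List.pyGetD arr2 d 0 = arr2.getD d.toNat 0 := by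
            rw [hdn, PySem.List.pyGetD_natCast, Int.toNat_natCast]
          have hstart : PySem.List.pyGetD arr2 d 0 = suf.headD d := by
            rw [hgArrD]
            cases suf with
            | nil => simpa using hlastcons (by simp)
            | cons z t => exact (List.isChain_cons_cons.mp hchsuf).1
          have hsuflen : suf.length ≤ arr2.length + 1 := by
            have h1 : (d :: suf).Sublist path2 := hsufx.sublist
            have h2 : path2.length ≤ L := nodup_bounded_length L path2 hnd2 hpr2
            have h3 := h1.length_le
            simp at h3
            omega
          have hwalk := cycMin_spec arr2 cost2 d suf (arr2.length + 1)
            (PySem.List.pyGetD cost2 d 0) hsuflen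
            (fun y hy => by intro he; subst he; exact hdnsuf hy)
            (fun y hy => (hpr2 y (hsufx.subset (by simp [hy]))).1)
            (hchsuf.suffix (List.suffix_cons d suf))
            (fun h => by
              have hx := hlastcons (by simp)
              rwa [List.getLast_cons h] at hx)
          have hBval : (PySem.List.min? ((path2.drop k).map
              (fun y => PySem.List.pyGetD cost2 y 0)) (fun v => v)).getD 0
              = suf.foldl (fun m y => min m (PySem.List.pyGetD cost2 y 0)) (PySem.List.pyGetD cost2 d 0) := by
            rw [hdropk, List.map_cons, PySem.List.min?_id_cons, Option.getD_some, List.foldl_map]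
          have hAval : cycMin arr2 cost2 d (arr2.length + 1) (PySem.List.pyGetD cost2 d 0)
              (PySem.List.pyGetD arr2 d 0)
              = suf.foldl (fun m y => min m (PySem.List.pyGetD cost2 y 0)) (PySem.List.pyGetD cost2 d 0) := by
            rw [hstart]; exact hwalk
          have hs' : phase2 arr2 cost2 (colors ++ [d]) = s + (PySem.List.min? ((path2.drop k).map
              (fun y => PySem.List.pyGetD cost2 y 0)) (fun v => v)).getD 0 := by
            have hph : phase2 arr2 cost2 (colors ++ [d]) = phase2 arr2 cost2 colors +
                cycMin arr2 cost2 d (arr2.length + 1) (PySem.List.pyGetD cost2 d 0)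
                  (PySem.List.pyGetD arr2 d 0) := by
              simp [phase2, List.foldl_append]
            rw [hph, ← hs, hAval, hBval]
          exact ih nv2 vis2 (colors ++ [d]) (c + 1) (s + (PySem.List.min? ((path2.drop k).map
              (fun y => PySem.List.pyGetD cost2 y 0)) (fun v => v)).getD 0)
            (fun j hj => hmem j (by simp [hj])) hlenNv2 hlenVis2 hcorr2 (by omega) hlt' hs'.symm
      · rw [if_neg (fun hcv => hcyc (hcond.mp hcv)), if_neg (by simpa using hcyc)]
        exact ih nv2 vis2 colors (c + 1) s (fun j hj => hmem j (by simp [hj])) hlenNv2 hlenVis2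
          hcorr2 (by omega) hlt' hs
    · -- node i already visited: both skip
      have hvT : visited.getD i.toNat false = true := (hcorr i.toNat hiLn).mpr hm
      have hmn : PySem.List.pyGetD nv i 0 ≠ -1 := by rw [hgNv]; exact hm
      have hvn : PySem.List.pyGetD visited i false = true := by rw [hgVis]; exact hvT
      have hsA : stepA arr2 (nv, colors, c) i = (nv, colors, c) := by
        simp [stepA, hmn]
      have hsB : stepB arr2 cost2 (visited, s) i = (visited, s) := by
        simp [stepB, hvn]
      rw [hsA, hsB]
      exact ih nv visited colors c s (fun j hj => hmem j (by simp [hj])) hlnv hlvis hcorr hc hlt hs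

theorem core_logic_spec : Claim_equal_core_logic := by
  intro n cost arr _ hpre
  unfold Spec_core_logic
  by_cases hn : n ≤ 0
  · have hr : PySem.List.pyRange 1 (n + 1) 1 = [] := PySem.List.pyRange_one_eq_nil (by omega)
    simp [core_logic, core_logic_alt, hr, phase2]
  · push_neg at hn
    rcases hpre with hle | ⟨hclen, halen, hbound⟩
    · omega
    · have hnt : (n + 1).toNat = n.toNat + 1 := by omega
      have hLint : ((n.toNat + 1 : Nat) : Int) = n + 1 := by omega
      have hA : ∀ j : Nat, j < n.toNat + 1 →
          0 ≤ (0 :: arr.drop 1).getD j 0 ∧ (0 :: arr.drop 1).getD j 0 < ((n.toNat + 1 : Nat) : Int) := by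
        intro j hj
        cases j with
        | zero =>
          refine ⟨by simp, ?_⟩
          simp only [List.getD_cons_zero]
          omega
        | succ kk =>
          have hlt : 1 + kk < arr.length := by omega
          have hval : (0 :: arr.drop 1).getD (kk + 1) 0 = arr[1 + kk] := by
            rw [List.getD_cons_succ, List.getD_eq_getElem _ _ (by simp only [List.length_drop]; omega),
              List.getElem_drop]
          have hlen2 : kk < ((arr.take (n.toNat + 1)).drop 1).length := by
            simp only [List.length_drop, List.length_take]; omega
          have hmem : arr[1 + kk] ∈ (arr.take (n.toNat + 1)).drop 1 := by
            have hge : ((arr.take (n.toNat + 1)).drop 1)[kk] = arr[1 + kk] := by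
              rw [List.getElem_drop, List.getElem_take]
            rw [← hge]
            exact List.getElem_mem hlen2
          have := hbound _ hmem
          rw [hval]
          omega
      have main := outerInv (0 :: arr.drop 1) (0 :: cost.drop 1) (n.toNat + 1)
        (by simp; omega) hA (PySem.List.pyRange 1 (n + 1) 1)
        (List.replicate (n.toNat + 1) (-1)) (List.replicate (n.toNat + 1) false) [] 0 0
        (by
          intro i hi
          rw [PySem.List.mem_pyRange_one] at hi
          omega)
        (by simp) (by simp)
        (by
          intro j hj
          rw [List.getD_eq_getElem _ _ (by simpa using hj), List.getD_eq_getElem _ _ (by simpa using hj)]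
          simp)
        le_rfl
        (by
          intro j hj
          rw [List.getD_eq_getElem _ _ (by simpa using hj)]
          simp)
        (by simp [phase2])
      show phase2 (0 :: arr.drop 1) (0 :: cost.drop 1)
          (((PySem.List.pyRange 1 (n + 1) 1).foldl (stepA (0 :: arr.drop 1))
            (List.replicate (n + 1).toNat (-1), [], 0)).2.1) =
        ((PySem.List.pyRange 1 (n + 1) 1).foldl (stepB (0 :: arr.drop 1) (0 :: cost.drop 1))
          (List.replicate (n + 1).toNat false, 0)).2
      rw [hnt]
      exact main.symm
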